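-- pv_equiv track=rewrite | github.com/tjcsl/ion | intranet/apps/printing/views.py | check_page_range
-- ===== SOURCE A (Python) =====
-- from typing import Dict, List, Optional, Tuple
--
-- def check_page_range(page_range: str, max_pages: int) -> Optional[int]:
--     """Returns the number of pages included in the range, or None if the range exceeds max_pages.
--
--     Args:
--         page_range: The page range as a string, such as "1-5" or "1,2,3". It has already been validated as
--             syntantically correct by the form validator.
--         max_pages: The number of pages in the submitted document. If the number of pages in the
--             given range exceeds this, it will be considered invalid.
--
--     Returns:
--         The number of pages in the range, or None if it's higher than max_pages.
--
--     """
--     pages = 0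
--     try:
--         for single_range in page_range.split(","):
--             if "-" in single_range:
--                 range_low, range_high = map(int, single_range.split("-"))
--
--                 # Check the page range.
--                 if range_low > max_pages or range_high > max_pages:
--                     return None
--
--                 pages += range_high - range_low + 1
--
--             else:
--                 single_range = int(single_range)
--                 if single_range > max_pages:  # Check the page range
--                     return None
--
--                 pages += 1
--     except ValueError:  # Form has been validated, so int parse error shouldn't occur.
--         return None
--     return pages
-- ===== SOURCE B (Python) =====
-- def normalize(part):
--     # Uniform: no bare-vs-range branching; every component becomes an interval (lo, hi).
--     nums = [int(x) for x in part.split("-")]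
--     if len(nums) > 2:
--         raise ValueError(part)
--     return (nums[0], nums[-1])
--
--
-- def check_page_range(page_range, max_pages):
--     try:
--         intervals = [normalize(p) for p in page_range.split(",")]
--     except ValueError:
--         return None
--     if max(max(lo, hi) for lo, hi in intervals) > max_pages:
--         return None
--     return sum(hi for _, hi in intervals) - sum(lo for lo, _ in intervals) + len(intervals)
-- ===== Notes on version B (the rewrite author's own statement) =====
-- stated objective: alternative
-- what changed: B drops A's bare-vs-range branch entirely: every component is uniformly split on '-' and normalized to an interval (lo, hi) (bare n becomes (n, n)), validity is one global max-of-endpoints comparison instead of per-component early returns, and the count is the closed formula sum(hi) - sum(lo) + len(intervals) instead of accumulating per-component page counts.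
import Mathlib
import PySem

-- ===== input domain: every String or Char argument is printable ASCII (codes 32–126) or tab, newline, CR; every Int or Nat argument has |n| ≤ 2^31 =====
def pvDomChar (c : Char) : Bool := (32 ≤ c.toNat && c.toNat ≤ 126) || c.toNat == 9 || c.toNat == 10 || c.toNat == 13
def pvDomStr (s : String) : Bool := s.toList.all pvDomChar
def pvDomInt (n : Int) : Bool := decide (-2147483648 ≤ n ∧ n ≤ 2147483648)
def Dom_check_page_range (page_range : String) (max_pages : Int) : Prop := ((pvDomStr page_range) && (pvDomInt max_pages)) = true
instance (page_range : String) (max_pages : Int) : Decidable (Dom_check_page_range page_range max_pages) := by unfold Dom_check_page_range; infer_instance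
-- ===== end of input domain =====

-- B removes A's bare-vs-range branch: every comma component is normalized to an interval (lo, hi),
-- validity is one global max-of-endpoints test, and the count is the closed formula Σhi - Σlo + #intervals.
-- ===== PORT A =====
-- A's for-loop over the comma components, threading the 'pages' accumulator; early returns become none.
def pvALoop (max_pages : Int) : List String → Int → Option Int
  | [], pages => some pages
  | s :: rest, pages =>
    if PySem.Str.isIn "-" s then
      match (PySem.Str.split? s "-").getD [] with
      | [p, q] =>
        match PySem.Int.ofStr? p, PySem.Int.ofStr? q with
        | some range_low, some range_high =>
          if range_low > max_pages ∨ range_high > max_pages then none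
          else pvALoop max_pages rest (pages + (range_high - range_low + 1))
        | _, _ => none   -- int() ValueError
      | _ => none        -- unpack ValueError (not exactly two parts)
    else
      match PySem.Int.ofStr? s with
      | some n => if n > max_pages then none else pvALoop max_pages rest (pages + 1)
      | none => none     -- int() ValueError

def check_page_range (page_range : String) (max_pages : Int) : Option Int :=
  pvALoop max_pages ((PySem.Str.split? page_range ",").getD []) 0

-- ===== PORT B =====
-- normalize: split on '-', parse all pieces, (nums[0], nums[-1]); none = ValueError.
def pvNormalize (part : String) : Option (Int × Int) :=
  match ((PySem.Str.split? part "-").getD []).mapM PySem.Int.ofStr? with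
  | none => none                           -- int() ValueError inside the comprehension
  | some nums =>
    if nums.length > 2 then none           -- raise ValueError(part)
    else
      match nums with
      | [a] => some (a, a)                 -- (nums[0], nums[-1])
      | [a, b] => some (a, b)
      | _ => none                          -- nums = [] never happens: split yields ≥ 1 piece

def check_page_range_alt (page_range : String) (max_pages : Int) : Option Int :=
  match ((PySem.Str.split? page_range ",").getD []).mapM pvNormalize with
  | none => none
  | some intervals =>
    match PySem.List.max? (intervals.map (fun p => max p.1 p.2)) (fun x => x) with
    | none => none                         -- max() on an empty list never happens: split yields ≥ 1 piece
    | some m =>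
      if m > max_pages then none
      else some ((intervals.map (·.2)).sum - (intervals.map (·.1)).sum + intervals.length)

-- ===== PRECONDITION & SPEC =====
def Spec_check_page_range (page_range : String) (max_pages : Int) (out : Option Int) : Prop := out = check_page_range_alt page_range max_pages
instance (page_range : String) (max_pages : Int) (out : Option Int) : Decidable (Spec_check_page_range page_range max_pages out) := by unfold Spec_check_page_range; infer_instance

-- ===== CLAIM (what is proved, stated in full; the proofs are below) =====
def Claim_equal_check_page_range : Prop := ∀ (page_range : String) (max_pages : Int), Dom_check_page_range page_range max_pages → Spec_check_page_range page_range max_pages (check_page_range page_range max_pages)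

-- ===== LEMMAS AND PROOFS =====

-- a mapM over Option preserves length (used for the ≥3-pieces case)
theorem pvMapM_length {α β : Type} (f : α → Option β) :
    ∀ (l : List α) (ys : List β), l.mapM f = some ys → ys.length = l.length := by
  intro l
  induction l with
  | nil => intro ys h; simp_all
  | cons a t ih =>
    intro ys h
    rw [List.mapM_cons] at h
    cases hf : f a <;> simp [hf] at h
    cases ht : t.mapM f <;> simp [ht] at h
    subst h
    simp [ih _ ht]

-- splitOn.go never returns the empty list
theorem pvGo_ne_nil (sep : List Char) :
    ∀ (fuel : Nat) (l cur : List Char) (acc : List (List Char)),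
      PySem.Chars.splitOn.go sep fuel l cur acc ≠ [] := by
  intro fuel
  induction fuel with
  | zero => intro l cur acc; simp [PySem.Chars.splitOn.go]
  | succ n ih =>
    intro l cur acc
    cases l with
    | nil => simp [PySem.Chars.splitOn.go]
    | cons c rest =>
      simp only [PySem.Chars.splitOn.go]
      split
      · exact ih _ _ _
      · exact ih _ _ _

-- splitOn.go with enough fuel and no separator occurrence: one piece
theorem pvGo_no_sep (sep : List Char) :
    ∀ (fuel : Nat) (l cur : List Char) (acc : List (List Char)),
      l.length < fuel → ¬ sep <:+: l →
      PySem.Chars.splitOn.go sep fuel l cur acc = acc.reverse ++ [cur.reverse ++ l] := by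
  intro fuel
  induction fuel with
  | zero => intro l cur acc h; omega
  | succ n ih =>
    intro l cur acc hlen hinf
    cases l with
    | nil => simp [PySem.Chars.splitOn.go]
    | cons c rest =>
      simp only [PySem.Chars.splitOn.go]
      split
      · rename_i hpre
        exact absurd (List.IsPrefix.isInfix (List.isPrefixOf_iff_prefix.mp hpre)) hinf
      · rw [ih rest (c :: cur) acc (by simpa using Nat.lt_of_succ_lt_succ hlen)
            (fun h => hinf (h.trans (List.suffix_cons c rest).isInfix))]
        simp

-- go's result has at least acc.length + 1 pieces
theorem pvGo_len_ge_one (sep : List Char) :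
    ∀ (fuel : Nat) (l cur : List Char) (acc : List (List Char)),
      acc.length + 1 ≤ (PySem.Chars.splitOn.go sep fuel l cur acc).length := by
  intro fuel
  induction fuel with
  | zero => intro l cur acc; simp [PySem.Chars.splitOn.go]
  | succ n ih =>
    intro l cur acc
    cases l with
    | nil => simp [PySem.Chars.splitOn.go]
    | cons c rest =>
      simp only [PySem.Chars.splitOn.go]
      split
      · have := ih (List.drop sep.length (c :: rest)) [] (cur.reverse :: acc)
        simp at this
        omega
      · exact ih _ _ _

-- with an occurrence of the separator: at least acc.length + 2 pieces
theorem pvGo_len_ge (sep : List Char) (hs : sep ≠ []) :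
    ∀ (fuel : Nat) (l cur : List Char) (acc : List (List Char)),
      l.length < fuel → sep <:+: l →
      2 + acc.length ≤ (PySem.Chars.splitOn.go sep fuel l cur acc).length := by
  intro fuel
  induction fuel with
  | zero => intro l cur acc h; omega
  | succ n ih =>
    intro l cur acc hlen hinf
    cases l with
    | nil =>
      exact absurd (List.eq_nil_of_infix_nil hinf) hs
    | cons c rest =>
      simp only [PySem.Chars.splitOn.go]
      split
      · have := pvGo_len_ge_one sep n (List.drop sep.length (c :: rest)) [] (cur.reverse :: acc)
        simp at this
        omega
      · rename_i hpre
        have hrest : sep <:+: rest := by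
          rcases (List.infix_cons_iff).mp hinf with h | h
          · exact absurd (List.isPrefixOf_iff_prefix.mpr h) (by simpa using hpre)
          · exact h
        exact ih rest (c :: cur) acc (by simpa using Nat.lt_of_succ_lt_succ hlen) hrest

theorem pvSplit_no_dash (s : String) (h : PySem.Str.isIn "-" s = false) :
    (PySem.Str.split? s "-").getD [] = [s] := by
  have hinf : ¬ ("-".toList <:+: s.toList) := by
    intro hi
    have := (PySem.Str.isIn_iff_infix "-" s).mpr hi
    rw [h] at this
    cases this
  have hf : s.toList.length = s.length := by simp
  simp only [PySem.Str.split?, PySem.Chars.split?, PySem.Chars.splitOn]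
  norm_num
  rw [pvGo_no_sep "-".toList (s.length + 1) s.toList [] [] (by omega) hinf]
  simp

theorem pvSplit_dash_len (s : String) (h : PySem.Str.isIn "-" s = true) :
    2 ≤ ((PySem.Str.split? s "-").getD []).length := by
  have hinf : "-".toList <:+: s.toList := (PySem.Str.isIn_iff_infix "-" s).mp h
  simp only [PySem.Str.split?, PySem.Chars.split?, PySem.Chars.splitOn]
  norm_num
  have := pvGo_len_ge ("-".toList) (by simp) (s.toList.length + 1) s.toList [] [] (Nat.lt_succ_self _) hinf
  simpa using this

theorem pvSplit_comma_ne_nil (s : String) : (PySem.Str.split? s ",").getD [] ≠ [] := by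
  simp only [PySem.Str.split?, PySem.Chars.split?, PySem.Chars.splitOn]
  norm_num
  exact fun h => pvGo_ne_nil _ _ _ _ _ (by simpa using h)

-- A's per-component step, expressed through B's normalize
theorem pvStep (mp : Int) (s : String) (rest : List String) (pages : Int) :
    pvALoop mp (s :: rest) pages =
      match pvNormalize s with
      | none => none
      | some t => if max t.1 t.2 > mp then none
                  else pvALoop mp rest (pages + (t.2 - t.1 + 1)) := by
  simp only [pvALoop, pvNormalize]
  cases hin : PySem.Str.isIn "-" s with
  | false =>
    rw [pvSplit_no_dash s hin]
    cases hn : PySem.Int.ofStr? s with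
    | none => simp [hn]
    | some a =>
      simp [hn]
  | true =>
    have hlen := pvSplit_dash_len s hin
    rcases hsp : (PySem.Str.split? s "-").getD [] with _ | ⟨p, _ | ⟨q, _ | ⟨r, tl⟩⟩⟩
    · rw [hsp] at hlen; simp at hlen
    · rw [hsp] at hlen; simp at hlen
    · cases hp : PySem.Int.ofStr? p with
      | none => simp [hp]
      | some lo =>
        cases hq : PySem.Int.ofStr? q with
        | none => simp [hp, hq]
        | some hi =>
          simp only [List.mapM_cons, List.mapM_nil, hp, hq]
          simp
    · cases hm : (p :: q :: r :: tl).mapM PySem.Int.ofStr? with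
      | none => simp
      | some nums =>
        have h3 : nums.length > 2 := by
          have := pvMapM_length _ _ _ hm
          simp at this
          omega
        simp [h3]

theorem pvLoop_eq (max_pages : Int) (comps : List String) : ∀ pages : Int,
    pvALoop max_pages comps pages =
      match comps.mapM pvNormalize with
      | none => none
      | some ivs =>
        if ivs.any (fun t => max t.1 t.2 > max_pages) then none
        else some (pages + (ivs.map (fun t => t.2 - t.1 + 1)).sum) := by
  induction comps with
  | nil => intro pages; simp [pvALoop]
  | cons s rest ih =>
    intro pages
    rw [pvStep]
    rw [List.mapM_cons]
    cases hc : pvNormalize s with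
    | none => rfl
    | some t =>
      by_cases hx : max t.1 t.2 > max_pages
      · cases hr : rest.mapM pvNormalize <;> simp [hx]
      · cases hr : rest.mapM pvNormalize with
        | none => simp [hx, ih, hr]
        | some ts =>
          have hx' : ¬ (max_pages < t.1 ∨ max_pages < t.2) := by simpa [lt_max_iff] using hx
          simp [hx', ih, hr, add_assoc]
          split_ifs with h1 h2 h2 <;>
            first
            | rfl
            | exact absurd (by rw [h1, Bool.or_true]) h2
            | (rcases (by simpa using h2 :
                  max t.1 t.2 > max_pages ∨ (ts.any fun t => decide (max t.1 t.2 > max_pages)) = true) with hd | hd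
               · exact absurd hd hx
               · exact absurd hd h1)

theorem pvSumSplit (ivs : List (Int × Int)) :
    (ivs.map (fun t => t.2 - t.1 + 1)).sum
      = (ivs.map (fun t => t.2)).sum - (ivs.map (fun t => t.1)).sum + ivs.length := by
  induction ivs with
  | nil => simp
  | cons t ts ih =>
    simp only [List.map_cons, List.sum_cons, List.length_cons, ih]
    push_cast
    ring

theorem pvAnyMax (mp : Int) (ivs : List (Int × Int)) (h : ivs ≠ []) :
    ∃ m, PySem.List.max? (ivs.map (fun p => max p.1 p.2)) (fun x => x) = some m ∧
      (ivs.any (fun t => max t.1 t.2 > mp) = true ↔ m > mp) := by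
  cases hm : PySem.List.max? (ivs.map (fun p => max p.1 p.2)) (fun x => x) with
  | none =>
    rw [PySem.List.max?_eq_none_iff] at hm
    simp at hm
    exact absurd hm h
  | some m =>
    refine ⟨m, rfl, ?_⟩
    constructor
    · intro hany
      obtain ⟨t, ht, hgt⟩ := List.any_eq_true.mp hany
      have := PySem.List.max?_isMax hm (max t.1 t.2) (List.mem_map_of_mem ht)
      simp at hgt
      omega
    · intro hgt
      have hmem := PySem.List.max?_mem hm
      obtain ⟨t, ht, rfl⟩ := List.mem_map.mp hmem
      exact List.any_eq_true.mpr ⟨t, ht, by simpa using hgt⟩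

-- ===== VERDICT (by name: the statement is the Claim_ definition above) =====
theorem check_page_range_spec : Claim_equal_check_page_range := by
  intro page_range max_pages _
  unfold Spec_check_page_range check_page_range check_page_range_alt
  rw [pvLoop_eq]
  cases hm : ((PySem.Str.split? page_range ",").getD []).mapM pvNormalize with
  | none => rfl
  | some ivs =>
    have hne : ivs ≠ [] := by
      intro hnil
      subst hnil
      have : ((PySem.Str.split? page_range ",").getD []) = [] := by
        cases hsp : (PySem.Str.split? page_range ",").getD [] with
        | nil => rfl
        | cons c cs =>
          rw [hsp, List.mapM_cons] at hm
          cases hc : pvNormalize c <;> simp [hc] at hm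
          cases hcs : cs.mapM pvNormalize <;> simp [hcs] at hm
      exact pvSplit_comma_ne_nil page_range this
    obtain ⟨m, hmax, hiff⟩ := pvAnyMax max_pages ivs hne
    simp only [hmax]
    by_cases hany : ivs.any (fun t => max t.1 t.2 > max_pages) = true
    · rw [if_pos hany, if_pos (hiff.mp hany)]
    · rw [if_neg hany, if_neg (fun h => hany (hiff.mpr h))]
      rw [pvSumSplit]
      norm_num
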